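-- pv_equiv track=rewrite | github.com/ddideu/ddideu | 알고리즘 문제/2025-07-15/jumpjump.py | My_Left_Jump
-- ===== SOURCE A (Python) =====
-- def My_Left_Jump(loc, roads, Jump):
--     total_jump = 1
--     flag = 1
--     while loc > -1:
--         if roads[loc] <= Jump:
--             total_jump += 1
--             loc -= 1
--         else:
--             if flag:
--                 flag = 0
--                 total_jump += 1
--                 loc -= 1
--             else:
--                 break
--     return total_jump
-- ===== SOURCE B (Python) =====
-- def My_Left_Jump(loc, roads, Jump):
--     # locate obstacles scanning left from loc; the scan stops at the second one
--     obstacles = [i for i in range(loc, -1, -1) if roads[i] > Jump]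
--     if len(obstacles) < 2:
--         return 1 + max(loc + 1, 0)
--     return 1 + (loc - obstacles[1])
-- ===== Notes on version B (the rewrite author's own statement) =====
-- stated objective: alternative
-- what changed: Replaces the flag-driven step-by-step while loop with collecting obstacle indices in one comprehension and computing the jump count in closed form from the position of the second obstacle.
import Mathlib
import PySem

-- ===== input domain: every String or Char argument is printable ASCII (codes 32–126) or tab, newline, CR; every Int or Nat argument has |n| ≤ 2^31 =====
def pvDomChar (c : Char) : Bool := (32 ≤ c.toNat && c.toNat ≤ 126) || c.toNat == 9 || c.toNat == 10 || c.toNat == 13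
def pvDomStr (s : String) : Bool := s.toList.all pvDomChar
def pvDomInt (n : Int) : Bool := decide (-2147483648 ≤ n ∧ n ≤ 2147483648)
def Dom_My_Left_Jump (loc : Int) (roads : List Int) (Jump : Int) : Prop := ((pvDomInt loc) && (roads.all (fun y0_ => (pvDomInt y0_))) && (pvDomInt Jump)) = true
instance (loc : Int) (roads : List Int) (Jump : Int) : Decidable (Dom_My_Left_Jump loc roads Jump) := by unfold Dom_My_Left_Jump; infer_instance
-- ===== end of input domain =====

-- B replaces A's flag-driven while loop by collecting the obstacle indices and a closed-form count (alternative decomposition, same cost).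


-- ===== PORT A =====
-- the while loop: state (loc, total_jump, flag); roads[loc] via pyGet? (getD 0 is only
-- reached outside Pre_, where Python raises IndexError)
def pvLoopA (roads : List Int) (Jump : Int) (loc total flag : Int) : Int :=
  if _h : loc > -1 then
    if (PySem.List.pyGet? roads loc).getD 0 ≤ Jump then
      pvLoopA roads Jump (loc - 1) (total + 1) flag
    else
      if flag ≠ 0 then
        pvLoopA roads Jump (loc - 1) (total + 1) 0
      else
        total
  else
    total
termination_by (loc + 1).toNat
decreasing_by all_goals omega

def My_Left_Jump (loc : Int) (roads : List Int) (Jump : Int) : Int :=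
  pvLoopA roads Jump loc 1 1

-- ===== PORT B =====
-- obstacles = [i for i in range(loc, -1, -1) if roads[i] > Jump]
def pvObstacles (loc : Int) (roads : List Int) (Jump : Int) : List Int :=
  (PySem.List.pyRange loc (-1) (-1)).filter (fun i => decide (Jump < (PySem.List.pyGet? roads i).getD 0))

def My_Left_Jump_alt (loc : Int) (roads : List Int) (Jump : Int) : Int :=
  let obstacles := pvObstacles loc roads Jump
  if (obstacles.length : Int) < 2 then
    1 + max (loc + 1) 0
  else
    1 + (loc - (PySem.List.pyGet? obstacles 1).getD 0)

-- ===== PRECONDITION & SPEC =====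
-- Pre_ excludes exactly the inputs where Python A raises IndexError (0 ≤ loc but loc ≥ len(roads));
-- Python B raises there too.
def Pre_My_Left_Jump (loc : Int) (roads : List Int) (Jump : Int) : Prop :=
  loc < 0 ∨ loc < (roads.length : Int)
instance (loc : Int) (roads : List Int) (Jump : Int) : Decidable (Pre_My_Left_Jump loc roads Jump) := by unfold Pre_My_Left_Jump; infer_instance

def pvWitness_My_Left_Jump : Int × List Int × Int := (2, [1, 5, 2], 3)

def Spec_My_Left_Jump (loc : Int) (roads : List Int) (Jump : Int) (out : Int) : Prop := out = My_Left_Jump_alt loc roads Jump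
instance (loc : Int) (roads : List Int) (Jump : Int) (out : Int) : Decidable (Spec_My_Left_Jump loc roads Jump out) := by unfold Spec_My_Left_Jump; infer_instance

-- ===== CLAIM (what is proved, stated in full; the proofs are below) =====
def Claim_equal_My_Left_Jump : Prop := ∀ (loc : Int) (roads : List Int) (Jump : Int), Dom_My_Left_Jump loc roads Jump → Pre_My_Left_Jump loc roads Jump → Spec_My_Left_Jump loc roads Jump (My_Left_Jump loc roads Jump)

-- ===== LEMMAS AND PROOFS =====

theorem pvObstacles_neg {loc : Int} (roads : List Int) (Jump : Int) (h : loc < 0) :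
    pvObstacles loc roads Jump = [] := by
  unfold pvObstacles
  rw [PySem.List.pyRange_neg_one_eq_nil (by omega)]
  rfl

theorem pvObstacles_cons {loc : Int} (roads : List Int) (Jump : Int) (h : 0 ≤ loc) :
    pvObstacles loc roads Jump =
      (if Jump < (PySem.List.pyGet? roads loc).getD 0 then [loc] else []) ++
        pvObstacles (loc - 1) roads Jump := by
  unfold pvObstacles
  rw [PySem.List.pyRange_neg_one_cons (by omega : (-1 : Int) < loc)]
  rw [List.filter_cons]
  split_ifs with h1 h2 h2 <;> simp_all

-- closed forms for the two flag states: with flag = 0 the loop stops at the FIRST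
-- obstacle, with flag = 1 at the SECOND
def pvStop0 (loc : Int) (obs : List Int) : Int :=
  if (obs.length : Int) < 1 then max (loc + 1) 0 else loc - (PySem.List.pyGet? obs 0).getD 0

def pvStop1 (loc : Int) (obs : List Int) : Int :=
  if (obs.length : Int) < 2 then max (loc + 1) 0 else loc - (PySem.List.pyGet? obs 1).getD 0

theorem pvLoopA_flag0 (roads : List Int) (Jump : Int) (loc total : Int) :
    pvLoopA roads Jump loc total 0 = total + pvStop0 loc (pvObstacles loc roads Jump) := by
  by_cases h : loc > -1
  · rw [pvObstacles_cons roads Jump (by omega)]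
    rw [pvLoopA, dif_pos h]
    by_cases hv : (PySem.List.pyGet? roads loc).getD 0 ≤ Jump
    · rw [if_neg (not_lt.mpr hv), List.nil_append, if_pos hv, pvLoopA_flag0]
      cases hob : pvObstacles (loc - 1) roads Jump with
      | nil => simp [pvStop0]; omega
      | cons j rest => simp [pvStop0, PySem.List.pyGet?, PySem.List.pyIdx?]; omega
    · rw [if_neg hv, if_neg (by simp), if_pos (lt_of_not_ge hv)]
      simp [pvStop0, PySem.List.pyGet?, PySem.List.pyIdx?]
  · rw [pvLoopA, dif_neg h, pvObstacles_neg roads Jump (by omega)]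
    simp [pvStop0]; omega
termination_by (loc + 1).toNat
decreasing_by omega

theorem pvLoopA_flag1 (roads : List Int) (Jump : Int) (loc total : Int) :
    pvLoopA roads Jump loc total 1 = total + pvStop1 loc (pvObstacles loc roads Jump) := by
  by_cases h : loc > -1
  · rw [pvObstacles_cons roads Jump (by omega)]
    rw [pvLoopA, dif_pos h]
    by_cases hv : (PySem.List.pyGet? roads loc).getD 0 ≤ Jump
    · rw [if_neg (not_lt.mpr hv), List.nil_append, if_pos hv, pvLoopA_flag1]
      cases hob : pvObstacles (loc - 1) roads Jump with
      | nil => simp [pvStop1]; omega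
      | cons j rest =>
        cases rest with
        | nil => simp [pvStop1]; omega
        | cons j2 rest2 => simp [pvStop1, PySem.List.pyGet?, PySem.List.pyIdx?]; omega
    · rw [if_pos (lt_of_not_ge hv), List.singleton_append, if_neg hv,
        if_pos (by decide : ((1 : Int) ≠ 0)), pvLoopA_flag0]
      cases hob : pvObstacles (loc - 1) roads Jump with
      | nil => simp [pvStop0, pvStop1]; omega
      | cons j rest => simp [pvStop0, pvStop1, PySem.List.pyGet?, PySem.List.pyIdx?]; omega
  · rw [pvLoopA, dif_neg h, pvObstacles_neg roads Jump (by omega)]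
    simp [pvStop1]; omega
termination_by (loc + 1).toNat
decreasing_by omega

-- ===== VERDICT (by name: the statement is the Claim_ definition above) =====
theorem My_Left_Jump_spec : Claim_equal_My_Left_Jump := by
  intro loc roads Jump _ _
  unfold Spec_My_Left_Jump My_Left_Jump My_Left_Jump_alt
  rw [pvLoopA_flag1]
  simp only [pvStop1]
  split_ifs <;> ring
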